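-- pv_equiv track=rewrite | github.com/wvandervaart/aoc2021 | day10/script.py | part1
-- ===== SOURCE A (Python) =====
-- def part1(chars):
--     """
--
--     ): 3 points.
--     ]: 57 points.
--     }: 1197 points.
--     >: 25137 points.
--
--     """
--     points = 0
--     for char in chars:
--         if char == ')':
--             points += 3
--         if char == ']':
--             points += 57
--         if char == '}':
--             points += 1197
--         if char == '>':
--             points += 25137
--     return points
-- ===== SOURCE B (Python) =====
-- def part1(chars):
--     counts = {}
--     for c in chars:
--         counts[c] = counts.get(c, 0) + 1
--     return sum(counts.get(b, 0) * v
--                for b, v in ((')', 3), (']', 57), ('}', 1197), ('>', 25137)))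
-- ===== Notes on version B (the rewrite author's own statement) =====
-- stated objective: alternative
-- what changed: Replaces the per-character four-way if accumulation with a histogram built in one pass followed by a weighted sum over only the four closing-bracket/value pairs.
import Mathlib
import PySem

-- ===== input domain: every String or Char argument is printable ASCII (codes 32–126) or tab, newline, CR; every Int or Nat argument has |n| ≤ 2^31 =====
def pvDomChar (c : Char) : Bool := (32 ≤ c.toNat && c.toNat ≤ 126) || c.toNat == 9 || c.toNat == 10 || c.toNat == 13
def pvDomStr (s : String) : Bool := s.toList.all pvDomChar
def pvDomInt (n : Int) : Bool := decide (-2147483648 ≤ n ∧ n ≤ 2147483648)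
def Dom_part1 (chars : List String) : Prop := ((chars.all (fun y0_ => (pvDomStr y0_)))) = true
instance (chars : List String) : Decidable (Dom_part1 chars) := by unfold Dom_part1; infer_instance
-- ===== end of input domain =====

-- B builds a character histogram in one pass, then takes a weighted sum over the four closing-bracket/value pairs (alternative decomposition, same cost).


-- ===== PORT A =====
def part1 (chars : List String) : Int :=
  chars.foldl (fun points char =>
    let points := if char = ")" then points + 3 else points
    let points := if char = "]" then points + 57 else points
    let points := if char = "}" then points + 1197 else points
    if char = ">" then points + 25137 else points) 0

-- ===== PORT B =====
def part1_alt (chars : List String) : Int :=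
  let counts : PySem.Dict String Int :=
    chars.foldl (fun d c => d.insert c (d.getD c 0 + 1)) PySem.Dict.empty
  ([(")", (3 : Int)), ("]", 57), ("}", 1197), (">", 25137)]).foldl
    (fun s bv => s + counts.getD bv.1 0 * bv.2) 0

-- ===== PRECONDITION & SPEC =====
def Spec_part1 (chars : List String) (out : Int) : Prop := out = part1_alt chars
instance (chars : List String) (out : Int) : Decidable (Spec_part1 chars out) := by unfold Spec_part1; infer_instance

-- ===== CLAIM (what is proved, stated in full; the proofs are below) =====
def Claim_equal_part1 : Prop := ∀ (chars : List String), Dom_part1 chars → Spec_part1 chars (part1 chars)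

-- ===== LEMMAS AND PROOFS =====

theorem part1_closed (chars : List String) (acc : Int) :
    chars.foldl (fun points char =>
      let points := if char = ")" then points + 3 else points
      let points := if char = "]" then points + 57 else points
      let points := if char = "}" then points + 1197 else points
      if char = ">" then points + 25137 else points) acc
    = acc + 3 * chars.count ")" + 57 * chars.count "]"
        + 1197 * chars.count "}" + 25137 * chars.count ">" := by
  induction chars generalizing acc with
  | nil => simp
  | cons x xs ih =>
    simp only [List.foldl_cons, ih, List.count_cons]
    by_cases h1 : x = ")" <;> by_cases h2 : x = "]" <;> by_cases h3 : x = "}" <;>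
      by_cases h4 : x = ">" <;> simp_all <;> ring

theorem part1_alt_closed (chars : List String) :
    part1_alt chars
    = 3 * chars.count ")" + 57 * chars.count "]"
        + 1197 * chars.count "}" + 25137 * chars.count ">" := by
  unfold part1_alt
  simp only [PySem.Dict.foldl_insert_getD_add_one_eq_counter, List.foldl_cons,
    List.foldl_nil, PySem.Dict.getD_counter]
  ring

-- ===== VERDICT (by name: the statement is the Claim_ definition above) =====
theorem part1_spec : Claim_equal_part1 := by
  intro chars _
  unfold Spec_part1 part1
  rw [part1_closed, part1_alt_closed]
  ring
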